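-- pv_equiv track=rewrite | github.com/SteveFreeBSD/FoxClaw | foxclaw/collect/extensions.py | _extract_permissions
-- ===== SOURCE A (Python) =====
-- def _extract_permissions(payload: dict[str, object]) -> tuple[list[str], list[str]]:
--     api_permissions: set[str] = set()
--     host_permissions: set[str] = set()
--
--     for key in (
--         "permissions",
--         "optional_permissions",
--         "host_permissions",
--         "optional_host_permissions",
--     ):
--         value = payload.get(key)
--         if not isinstance(value, list):
--             continue
--
--         for item in value:
--             if not isinstance(item, str):
--                 continue
--             token = item.strip()
--             if not token:
--                 continue
--             if _is_host_permission(token):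
--                 host_permissions.add(token)
--             else:
--                 api_permissions.add(token)
--
--     return sorted(api_permissions), sorted(host_permissions)
--
-- def _is_host_permission(permission: str) -> bool:
--     return permission == "<all_urls>" or "://" in permission
-- ===== SOURCE B (Python) =====
-- def _extract_permissions(payload):
--     # Collect every stripped non-empty string token (duplicates kept) into one flat list,
--     # sort it once, then a single scan dedupes adjacent equals and routes each token.
--     raw = []
--     for key in (
--         "permissions",
--         "optional_permissions",
--         "host_permissions",
--         "optional_host_permissions",
--     ):
--         value = payload.get(key)
--         if isinstance(value, list):
--             for item in value:
--                 if isinstance(item, str):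
--                     token = item.strip()
--                     if token:
--                         raw.append(token)
--     raw.sort()
--     api_permissions = []
--     host_permissions = []
--     prev = None
--     for token in raw:
--         if token != prev:
--             if _is_host_permission(token):
--                 host_permissions.append(token)
--             else:
--                 api_permissions.append(token)
--             prev = token
--     return api_permissions, host_permissions
--
--
-- def _is_host_permission(permission: str) -> bool:
--     return permission == "<all_urls>" or "://" in permission
-- ===== Notes on version B (the rewrite author's own statement) =====
-- stated objective: alternative
-- what changed: A dedupes with two hash sets and sorts each set; B uses no sets at all: it gathers all tokens with duplicates into one flat list, sorts it once, and a single linear scan removes adjacent duplicates while routing each token to the api or host list.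
import Mathlib
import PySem

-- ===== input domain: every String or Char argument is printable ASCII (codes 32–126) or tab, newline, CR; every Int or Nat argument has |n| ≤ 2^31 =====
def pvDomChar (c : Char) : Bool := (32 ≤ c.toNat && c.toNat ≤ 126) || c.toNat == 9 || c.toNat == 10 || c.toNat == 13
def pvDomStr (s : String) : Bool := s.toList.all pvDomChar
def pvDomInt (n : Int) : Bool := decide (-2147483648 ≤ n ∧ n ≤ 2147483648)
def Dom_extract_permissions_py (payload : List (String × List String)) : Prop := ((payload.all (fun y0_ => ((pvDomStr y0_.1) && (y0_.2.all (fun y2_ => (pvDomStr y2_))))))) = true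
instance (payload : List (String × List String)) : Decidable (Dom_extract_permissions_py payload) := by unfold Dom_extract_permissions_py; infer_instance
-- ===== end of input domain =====

-- B replaces A's two hash sets + two sorts by: one flat token list with duplicates,
-- one sort, then a single scan that drops adjacent duplicates and routes each token.

-- ===== PORT A =====
def pvIsHost (permission : String) : Bool :=
  permission == "<all_urls>" || PySem.Str.isIn "://" permission

def pvKeys : List String :=
  ["permissions", "optional_permissions", "host_permissions", "optional_host_permissions"]

-- 'for item in value: token = item.strip(); if not token: continue; classify'
def pvStepA (st : PySem.Set String × PySem.Set String) (item : String) :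
    PySem.Set String × PySem.Set String :=
  let token := PySem.Str.strip item
  if token == "" then st
  else if pvIsHost token then (st.1, PySem.Set.add st.2 token)
  else (PySem.Set.add st.1 token, st.2)

def extract_permissions_py (payload : List (String × List String)) : List String × List String :=
  let st := pvKeys.foldl (fun st key =>
      match PySem.Dict.get? ⟨payload⟩ key with
      | none => st
      | some value => value.foldl pvStepA st)
    ((PySem.Set.empty : PySem.Set String), (PySem.Set.empty : PySem.Set String))
  (PySem.List.sorted st.1 (fun x => x) false, PySem.List.sorted st.2 (fun x => x) false)

-- ===== PORT B =====
-- 'token = item.strip(); if token: raw.append(token)'  — a plain list, duplicates kept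
def pvCollStep (raw : List String) (item : String) : List String :=
  let token := PySem.Str.strip item
  if token == "" then raw else raw ++ [token]

-- 'if token != prev: route token; prev = token'  — state (api, host, prev)
def pvScanStep (st : List String × List String × Option String) (token : String) :
    List String × List String × Option String :=
  if some token == st.2.2 then st
  else if pvIsHost token then (st.1, st.2.1 ++ [token], some token)
  else (st.1 ++ [token], st.2.1, some token)

def extract_permissions_py_alt (payload : List (String × List String)) : List String × List String :=
  let raw := pvKeys.foldl (fun raw key =>
      match PySem.Dict.get? ⟨payload⟩ key with
      | none => raw
      | some value => value.foldl pvCollStep raw) []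
  let sorted := PySem.List.sorted raw (fun x => x) false
  let st := sorted.foldl pvScanStep ([], [], none)
  (st.1, st.2.1)

-- ===== PRECONDITION & SPEC =====
def Spec_extract_permissions_py (payload : List (String × List String)) (out : List String × List String) : Prop := out = extract_permissions_py_alt payload
instance (payload : List (String × List String)) (out : List String × List String) : Decidable (Spec_extract_permissions_py payload out) := by unfold Spec_extract_permissions_py; infer_instance

-- ===== CLAIM (what is proved, stated in full; the proofs are below) =====
def Claim_equal_extract_permissions_py : Prop := ∀ (payload : List (String × List String)), Dom_extract_permissions_py payload → Spec_extract_permissions_py payload (extract_permissions_py payload)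

-- ===== LEMMAS AND PROOFS =====

def pvApi (t : String) : Bool := !pvIsHost t
def pvHost (t : String) : Bool := pvIsHost t

-- proof-only mirror of A's dedup as a single set (used to characterise both sides)
def pvStepT (s : PySem.Set String) (item : String) : PySem.Set String :=
  let token := PySem.Str.strip item
  if token == "" then s else PySem.Set.add s token

def pvTokens (payload : List (String × List String)) : PySem.Set String :=
  pvKeys.foldl (fun t key =>
      match PySem.Dict.get? ⟨payload⟩ key with
      | none => t
      | some value => value.foldl pvStepT t) []

def pvRaw (payload : List (String × List String)) : List String :=
  pvKeys.foldl (fun raw key =>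
      match PySem.Dict.get? ⟨payload⟩ key with
      | none => raw
      | some value => value.foldl pvCollStep raw) []

-- adjacent dedup relative to a 'previous kept' element
def pvDedup (prev : Option String) : List String → List String
  | [] => []
  | x :: xs => if some x == prev then pvDedup prev xs else x :: pvDedup (some x) xs

-- ===== relating A's pair of sets to the single set pvTokens =====

theorem pv_filter_add_pos (p : String → Bool) (s : List String) (x : String) (hp : p x = true) :
    (PySem.Set.add s x).filter p = PySem.Set.add (s.filter p) x := by
  by_cases hx : x ∈ s
  · simp [PySem.Set.add, hx, hp]
  · simp [PySem.Set.add, hx, hp, List.filter_append]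

theorem pv_filter_add_neg (p : String → Bool) (s : List String) (x : String) (hp : p x = false) :
    (PySem.Set.add s x).filter p = s.filter p := by
  by_cases hx : x ∈ s
  · simp [PySem.Set.add, hx]
  · simp [PySem.Set.add, hx, List.filter_append, hp]

theorem pv_stepA_eq (s : PySem.Set String) (item : String) :
    pvStepA (s.filter pvApi, s.filter pvHost) item
      = ((pvStepT s item).filter pvApi, (pvStepT s item).filter pvHost) := by
  simp only [pvStepA, pvStepT]
  by_cases he : PySem.Str.strip item == ""
  · simp [he]
  · simp only [he, if_false, Bool.false_eq_true]
    by_cases hh : pvIsHost (PySem.Str.strip item)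
    · have ha : pvApi (PySem.Str.strip item) = false := by simp [pvApi, hh]
      have hb : pvHost (PySem.Str.strip item) = true := by simp [pvHost, hh]
      simp [hh, pv_filter_add_neg _ _ _ ha, pv_filter_add_pos _ _ _ hb]
    · have ha : pvApi (PySem.Str.strip item) = true := by simp [pvApi, hh]
      have hb : pvHost (PySem.Str.strip item) = false := by simp [pvHost, hh]
      simp [hh, pv_filter_add_pos _ _ _ ha, pv_filter_add_neg _ _ _ hb]

theorem pv_inner_eq (items : List String) (s : PySem.Set String) :
    items.foldl pvStepA (s.filter pvApi, s.filter pvHost)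
      = ((items.foldl pvStepT s).filter pvApi, (items.foldl pvStepT s).filter pvHost) := by
  induction items generalizing s with
  | nil => rfl
  | cons x xs ih => simp only [List.foldl_cons, pv_stepA_eq, ih]

theorem pv_outer_eq (keys : List String) (payload : List (String × List String))
    (s : PySem.Set String) :
    keys.foldl (fun st key =>
        match PySem.Dict.get? ⟨payload⟩ key with
        | none => st
        | some value => value.foldl pvStepA st) (s.filter pvApi, s.filter pvHost)
      = (((keys.foldl (fun t key =>
            match PySem.Dict.get? ⟨payload⟩ key with
            | none => t
            | some value => value.foldl pvStepT t) s)).filter pvApi,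
         ((keys.foldl (fun t key =>
            match PySem.Dict.get? ⟨payload⟩ key with
            | none => t
            | some value => value.foldl pvStepT t) s)).filter pvHost) := by
  induction keys generalizing s with
  | nil => rfl
  | cons k ks ih =>
    simp only [List.foldl_cons]
    cases PySem.Dict.get? (⟨payload⟩ : PySem.Dict String (List String)) k with
    | none => exact ih s
    | some value =>
      show List.foldl _ (List.foldl pvStepA (s.filter pvApi, s.filter pvHost) value) ks = _
      rw [pv_inner_eq]
      exact ih _

-- ===== pvTokens is nodup and has exactly pvRaw's elements =====

theorem pv_stepT_nodup (s : PySem.Set String) (item : String) (h : s.Nodup) :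
    (pvStepT s item).Nodup := by
  simp only [pvStepT]
  split
  · exact h
  · exact PySem.Set.nodup_add _ _ h

theorem pv_foldT_nodup (items : List String) (s : PySem.Set String) (h : s.Nodup) :
    (items.foldl pvStepT s).Nodup := by
  induction items generalizing s with
  | nil => exact h
  | cons x xs ih => exact ih _ (pv_stepT_nodup s x h)

theorem pv_tokens_nodup (payload : List (String × List String)) : (pvTokens payload).Nodup := by
  unfold pvTokens
  generalize pvKeys = keys
  have : ∀ (keys : List String) (s : PySem.Set String), s.Nodup →
      (keys.foldl (fun t key =>
        match PySem.Dict.get? ⟨payload⟩ key with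
        | none => t
        | some value => value.foldl pvStepT t) s).Nodup := by
    intro keys
    induction keys with
    | nil => intro s h; exact h
    | cons k ks ih =>
      intro s h
      simp only [List.foldl_cons]
      cases PySem.Dict.get? (⟨payload⟩ : PySem.Dict String (List String)) k with
      | none => exact ih s h
      | some value => exact ih _ (pv_foldT_nodup value s h)
  exact this keys [] List.nodup_nil

theorem pv_mem_stepT (s : PySem.Set String) (item x : String) :
    x ∈ pvStepT s item ↔ x ∈ s ∨ x ∈ pvCollStep [] item := by
  simp only [pvStepT, pvCollStep]
  by_cases he : PySem.Str.strip item == ""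
  · simp [he]
  · simp [he, PySem.Set.mem_add]

theorem pv_mem_inner (items : List String) (s : PySem.Set String) (raw : List String)
    (h : ∀ x, x ∈ s ↔ x ∈ raw) (x : String) :
    x ∈ items.foldl pvStepT s ↔ x ∈ items.foldl pvCollStep raw := by
  induction items generalizing s raw with
  | nil => exact h x
  | cons i is ih =>
    simp only [List.foldl_cons]
    refine ih _ _ (fun y => ?_)
    rw [pv_mem_stepT]
    simp only [pvCollStep]
    by_cases he : PySem.Str.strip i == ""
    · simp [he, h y]
    · simp [he, h y]

theorem pv_mem_tokens (payload : List (String × List String)) (x : String) :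
    x ∈ pvTokens payload ↔ x ∈ pvRaw payload := by
  unfold pvTokens pvRaw
  generalize pvKeys = keys
  have : ∀ (keys : List String) (s : PySem.Set String) (raw : List String),
      (∀ y, y ∈ s ↔ y ∈ raw) → ∀ y,
      (y ∈ keys.foldl (fun t key =>
        match PySem.Dict.get? ⟨payload⟩ key with
        | none => t
        | some value => value.foldl pvStepT t) s
       ↔ y ∈ keys.foldl (fun raw key =>
        match PySem.Dict.get? ⟨payload⟩ key with
        | none => raw
        | some value => value.foldl pvCollStep raw) raw) := by
    intro keys
    induction keys with
    | nil => intro s raw h y; exact h y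
    | cons k ks ih =>
      intro s raw h y
      simp only [List.foldl_cons]
      cases PySem.Dict.get? (⟨payload⟩ : PySem.Dict String (List String)) k with
      | none => exact ih s raw h y
      | some value => exact ih _ _ (pv_mem_inner value s raw h) y
  exact this keys [] [] (by simp) x

-- ===== the dedup scan =====

theorem pv_scan_eq (l : List String) : ∀ (a h : List String) (prev : Option String),
    ∃ q, l.foldl pvScanStep (a, h, prev)
      = (a ++ (pvDedup prev l).filter pvApi, h ++ (pvDedup prev l).filter pvHost, q) := by
  induction l with
  | nil => intro a h prev; exact ⟨prev, by simp [pvDedup]⟩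
  | cons x xs ih =>
    intro a h prev
    simp only [List.foldl_cons, pvScanStep, pvDedup]
    by_cases hp : some x == prev
    · simp only [hp, if_true]
      exact ih a h prev
    · simp only [hp, Bool.false_eq_true, if_false]
      by_cases hh : pvIsHost x
      · obtain ⟨q, hq⟩ := ih a (h ++ [x]) (some x)
        refine ⟨q, ?_⟩
        have ha : pvApi x = false := by simp [pvApi, hh]
        have hb : pvHost x = true := by simp [pvHost, hh]
        simp [hh, hq, ha, hb]
      · obtain ⟨q, hq⟩ := ih (a ++ [x]) h (some x)
        refine ⟨q, ?_⟩
        have ha : pvApi x = true := by simp [pvApi, hh]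
        have hb : pvHost x = false := by simp [pvHost, hh]
        simp [hh, hq, ha, hb]

-- dedup of a ≤-sorted list, relative to a lower-bound prev: strictly increasing,
-- and keeps exactly the elements other than prev
theorem pv_dedup_sorted (l : List String) (prev : Option String)
    (hs : l.Pairwise (· ≤ ·)) (hp : ∀ p, prev = some p → ∀ y ∈ l, p ≤ y) :
    (pvDedup prev l).Pairwise (· < ·) ∧ ∀ x, (x ∈ pvDedup prev l ↔ x ∈ l ∧ prev ≠ some x) := by
  induction l generalizing prev with
  | nil => simp [pvDedup]
  | cons x xs ih =>
    have hx : ∀ y ∈ xs, x ≤ y := fun y hy => (List.pairwise_cons.mp hs).1 y hy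
    have hs' : xs.Pairwise (· ≤ ·) := (List.pairwise_cons.mp hs).2
    simp only [pvDedup]
    by_cases hpx : some x = prev
    · rw [if_pos (by simp [hpx])]
      obtain ⟨h1, h2⟩ := ih prev hs' (fun p hple y hy => by
        rw [← hpx] at hple; exact (Option.some.inj hple) ▸ hx y hy)
      refine ⟨h1, fun y => ?_⟩
      rw [h2 y]
      constructor
      · rintro ⟨hy, hne⟩; exact ⟨List.mem_cons_of_mem _ hy, hne⟩
      · rintro ⟨hy, hne⟩
        rcases List.mem_cons.mp hy with rfl | hy'
        · exact absurd hpx.symm hne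
        · exact ⟨hy', hne⟩
    · rw [if_neg (by simp [hpx])]
      obtain ⟨h1, h2⟩ := ih (some x) hs'
        (fun p hpe y hy => (Option.some.inj hpe) ▸ hx y hy)
      refine ⟨?_, fun y => ?_⟩
      · refine List.pairwise_cons.mpr ⟨fun y hy => ?_, h1⟩
        obtain ⟨hyxs, hyne⟩ := (h2 y).mp hy
        exact lt_of_le_of_ne (hx y hyxs) (fun h => hyne (congrArg some h))
      · constructor
        · intro hy
          rcases List.mem_cons.mp hy with rfl | hy'
          · exact ⟨List.mem_cons_self .., fun hc => hpx hc.symm⟩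
          · obtain ⟨hyxs, hyne⟩ := (h2 y).mp hy'
            refine ⟨List.mem_cons_of_mem _ hyxs, fun hc => ?_⟩
            have hyx1 : y ≤ x := hp y hc x (List.mem_cons_self ..)
            have hyx2 : x ≤ y := hx y hyxs
            exact hyne (congrArg some (le_antisymm hyx2 hyx1))
        · rintro ⟨hy, hne⟩
          rcases List.mem_cons.mp hy with rfl | hy'
          · exact List.mem_cons_self ..
          · by_cases hyx : y = x
            · subst hyx; exact List.mem_cons_self ..
            · exact List.mem_cons_of_mem _
                ((h2 y).mpr ⟨hy', fun hc => hyx (Option.some.inj hc).symm⟩)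

-- ===== VERDICT (by name: the statement is the Claim_ definition above) =====
theorem extract_permissions_py_spec : Claim_equal_extract_permissions_py := by
  intro payload _
  unfold Spec_extract_permissions_py
  simp only [extract_permissions_py]
  have h0 : ((PySem.Set.empty : PySem.Set String), (PySem.Set.empty : PySem.Set String))
      = ((PySem.Set.empty : PySem.Set String).filter pvApi,
         (PySem.Set.empty : PySem.Set String).filter pvHost) := rfl
  rw [h0, pv_outer_eq]
  show (PySem.List.sorted ((pvTokens payload).filter pvApi) (fun x => x) false,
        PySem.List.sorted ((pvTokens payload).filter pvHost) (fun x => x) false)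
      = (((PySem.List.sorted (pvRaw payload) (fun x => x) false).foldl
            pvScanStep ([], [], none)).1,
         ((PySem.List.sorted (pvRaw payload) (fun x => x) false).foldl
            pvScanStep ([], [], none)).2.1)
  obtain ⟨q, hq⟩ := pv_scan_eq (PySem.List.sorted (pvRaw payload) (fun x => x) false) [] [] none
  rw [hq]
  simp only [List.nil_append]
  have hSp : (PySem.List.sorted (pvRaw payload) (fun x => x) false).Pairwise (· ≤ ·) :=
    PySem.List.sorted_pairwise (pvRaw payload) (fun x => x)
  obtain ⟨hD1, hD2⟩ := pv_dedup_sorted _ none hSp (by intro p hp; cases hp)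
  have hmem : ∀ x, x ∈ pvDedup none (PySem.List.sorted (pvRaw payload) (fun x => x) false)
      ↔ x ∈ pvTokens payload := by
    intro x
    rw [hD2 x, pv_mem_tokens]
    simp [PySem.List.mem_sorted]
  have hperm : (pvDedup none (PySem.List.sorted (pvRaw payload) (fun x => x) false)).Perm
      (pvTokens payload) :=
    (List.perm_ext_iff_of_nodup hD1.nodup (pv_tokens_nodup payload)).mpr hmem
  rw [PySem.List.sorted_eq_of_perm_of_pairwise_lt _ _ _ (hperm.filter pvApi) (hD1.filter pvApi),
    PySem.List.sorted_eq_of_perm_of_pairwise_lt _ _ _ (hperm.filter pvHost) (hD1.filter pvHost)]
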